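-- pv_equiv track=rewrite | github.com/Angel-Ozz/LeetCode-Individual | Solution2-findMatrix.py | findMatrix
-- ===== SOURCE A (Python) =====
-- from typing import List
--
-- def findMatrix(nums: List[int]) -> List[List[int]]:
--     twoD = []
--     twoD.append([])
--     i = 0
--     for n in nums:
--         i = 0
--
--         while n in twoD[i]:
--             i = i + 1
--             if i == len(twoD):
--                 twoD.append([])
--
--         twoD[i].append(n)
--
--     return twoD
-- ===== SOURCE B (Python) =====
-- from typing import List
--
-- def findMatrix(nums: List[int]) -> List[List[int]]:
--     rows = [[]]
--     count = {}
--     for n in nums: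
--         c = count.get(n, 0)
--         if c == len(rows):
--             rows.append([])
--         rows[c].append(n)
--         count[n] = c + 1
--     return rows
-- ===== Notes on version B (the rewrite author's own statement) =====
-- stated objective: faster
-- what changed: Replaces A's inner while-loop that scans each existing row for membership of n with a dict of occurrence counts, so each element is appended to row count[n] directly in O(1).
import Mathlib
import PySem

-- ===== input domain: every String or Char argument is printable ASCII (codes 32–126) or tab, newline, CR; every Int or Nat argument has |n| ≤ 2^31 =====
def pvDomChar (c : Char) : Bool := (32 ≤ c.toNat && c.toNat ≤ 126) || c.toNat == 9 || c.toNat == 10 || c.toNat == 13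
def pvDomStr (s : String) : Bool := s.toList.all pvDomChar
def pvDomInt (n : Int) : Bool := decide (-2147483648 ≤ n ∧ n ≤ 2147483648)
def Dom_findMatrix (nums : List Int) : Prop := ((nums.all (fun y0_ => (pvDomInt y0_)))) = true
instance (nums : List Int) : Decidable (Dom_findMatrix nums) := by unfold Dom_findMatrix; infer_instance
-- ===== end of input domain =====

-- B replaces A's per-element membership scan over all rows with a dict of
-- occurrence counts (append n to row count[n]); equivalence of return values,
-- measured asymptotically faster in a timing run.
-- (A's Python mutates only its local lists; no argument is mutated.)


-- ===== PORT A =====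
-- A's inner loop: `while n in twoD[i]: i += 1; if i == len(twoD): twoD.append([])`.
-- The fuel only guards termination; in A's executions i < len(twoD) always holds
-- and the loop runs at most len(twoD) times, so fuel = len(twoD)+1 never runs out.
def findWhile (n : Int) : Nat → List (List Int) → Nat → List (List Int) × Nat
  | 0, twoD, i => (twoD, i)
  | fuel + 1, twoD, i =>
    if n ∈ twoD.getD i [] then
      findWhile n fuel (if i + 1 = twoD.length then twoD ++ [[]] else twoD) (i + 1)
    else (twoD, i)

-- `twoD[i].append(n)` = set row i to itself with n appended
def findMatrix (nums : List Int) : List (List Int) :=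
  nums.foldl (fun twoD n =>
    let r := findWhile n (twoD.length + 1) twoD 0
    r.1.set r.2 (r.1.getD r.2 [] ++ [n])) [[]]

-- ===== PORT B =====
-- one step of B's loop: c = count.get(n, 0); if c == len(rows): rows.append([]);
-- rows[c].append(n); count[n] = c + 1
def altStep (st : List (List Int) × PySem.Dict Int Int) (n : Int) :
    List (List Int) × PySem.Dict Int Int :=
  let c : Int := st.2.getD n 0
  let rows := if c = (st.1.length : Int) then st.1 ++ [[]] else st.1
  (rows.set c.toNat (rows.getD c.toNat [] ++ [n]), st.2.insert n (c + 1))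

def findMatrix_alt (nums : List Int) : List (List Int) :=
  (nums.foldl altStep ([[]], PySem.Dict.empty)).1

-- ===== PRECONDITION & SPEC =====
def Spec_findMatrix (nums : List Int) (out : List (List Int)) : Prop := out = findMatrix_alt nums
instance (nums : List Int) (out : List (List Int)) : Decidable (Spec_findMatrix nums out) := by unfold Spec_findMatrix; infer_instance

-- ===== CLAIM (what is proved, stated in full; the proofs are below) =====
def Claim_equal_findMatrix : Prop := ∀ (nums : List Int), Dom_findMatrix nums → Spec_findMatrix nums (findMatrix nums)

-- ===== LEMMAS AND PROOFS =====

-- Invariant tying A's matrix R to B's counter d: R is nonempty, each count is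
-- between 0 and len(R), and m occurs exactly in rows 0 .. count(m)-1.
def InvFM (R : List (List Int)) (d : PySem.Dict Int Int) : Prop :=
  R ≠ [] ∧ ∀ m : Int,
    (0 ≤ d.getD m 0 ∧ d.getD m 0 ≤ (R.length : Int)) ∧
    ∀ i : Nat, (m ∈ R.getD i [] ↔ (i : Int) < d.getD m 0)

lemma mem_getD_append_nil (R : List (List Int)) (j : Nat) (x : Int) :
    x ∈ (R ++ [([] : List Int)]).getD j [] ↔ x ∈ R.getD j [] := by
  rw [List.getD_eq_getElem?_getD, List.getD_eq_getElem?_getD]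
  rcases lt_trichotomy j R.length with h | h | h
  · rw [List.getElem?_append_left h]
  · subst h
    rw [List.getElem?_append_right (le_refl _)]
    simp
  · rw [List.getElem?_eq_none (by simp; omega), List.getElem?_eq_none (by omega)]

lemma getD_set_list (R : List (List Int)) (k j : Nat) (v : List Int) :
    (R.set k v).getD j [] = if k = j ∧ k < R.length then v else R.getD j [] := by
  rw [List.getD_eq_getElem?_getD, List.getD_eq_getElem?_getD, List.getElem?_set]
  by_cases h : k = j
  · subst h
    by_cases h2 : k < R.length <;> simp [h2]
  · simp [h]

-- A's while loop, characterised: starting at i with c the number of rows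
-- containing n (rows containing n are exactly 0..c-1), it stops at index c,
-- appending a fresh empty row exactly when c = len(twoD).
lemma findWhile_spec (n : Int) (c : Nat) :
    ∀ (fuel i : Nat) (twoD : List (List Int)),
      (∀ j : Nat, n ∈ twoD.getD j [] ↔ j < c) →
      c ≤ twoD.length →
      (i < c ∨ c < twoD.length) →
      i ≤ c → c - i < fuel →
      findWhile n fuel twoD i = (if c = twoD.length then twoD ++ [[]] else twoD, c) := by
  intro fuel
  induction fuel with
  | zero => intro i twoD _ _ _ _ hf; omega
  | succ k ih =>
    intro i twoD hmem hle hlt hi hf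
    rw [findWhile]
    by_cases hin : n ∈ twoD.getD i []
    · have hic : i < c := (hmem i).mp hin
      rw [if_pos hin]
      by_cases happ : i + 1 = twoD.length
      · -- append occurs: forces c = len(twoD) = i+1
        have hc : c = twoD.length := by omega
        rw [if_pos happ]
        have hmem' : ∀ j : Nat, n ∈ (twoD ++ [([] : List Int)]).getD j [] ↔ j < c := by
          intro j; rw [mem_getD_append_nil]; exact hmem j
        have := ih (i + 1) (twoD ++ [[]]) hmem'
          (by simp; omega) (by right; simp; omega) (by omega) (by omega)
        rw [this, if_neg (by simp; omega), if_pos hc]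
      · rw [if_neg happ]
        exact ih (i + 1) twoD hmem hle (by omega) (by omega) (by omega)
    · have hic : ¬ i < c := fun h => hin ((hmem i).mpr h)
      have hceq : c = i := by omega
      rw [if_neg hin]
      subst hceq
      rw [if_neg (by omega)]

-- Updating row c with n and bumping n's count preserves the invariant.
lemma inv_update (R' : List (List Int)) (d : PySem.Dict Int Int) (n : Int) (c : Nat)
    (hc : c < R'.length)
    (hcast : (c : Int) = d.getD n 0)
    (hmemn : ∀ j : Nat, n ∈ R'.getD j [] ↔ j < c)
    (hother : ∀ m : Int, m ≠ n →
      (0 ≤ d.getD m 0 ∧ d.getD m 0 ≤ (R'.length : Int)) ∧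
      ∀ j : Nat, (m ∈ R'.getD j [] ↔ (j : Int) < d.getD m 0)) :
    InvFM (R'.set c (R'.getD c [] ++ [n])) (d.insert n ((c : Int) + 1)) := by
  have hlen : (R'.set c (R'.getD c [] ++ [n])).length = R'.length := by simp
  constructor
  · intro hnil
    have h0 : (R'.set c (R'.getD c [] ++ [n])).length = 0 := by rw [hnil]; rfl
    rw [hlen] at h0
    omega
  · intro m
    rcases eq_or_ne m n with rfl | hmn
    · rw [PySem.Dict.getD_insert_self]
      refine ⟨⟨by omega, by rw [hlen]; omega⟩, ?_⟩
      intro j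
      rw [getD_set_list]
      by_cases hjc : c = j ∧ c < R'.length
      · rw [if_pos hjc]
        simp only [List.mem_append, List.mem_singleton]
        constructor
        · intro _; omega
        · intro _; right; trivial
      · rw [if_neg hjc]
        have hjne : c ≠ j := fun h => hjc ⟨h, hc⟩
        rw [hmemn j]
        omega
    · rw [PySem.Dict.getD_insert_of_ne _ _ _ hmn]
      obtain ⟨⟨h0, hle'⟩, hmem'⟩ := hother m hmn
      refine ⟨⟨h0, by rw [hlen]; exact hle'⟩, ?_⟩
      intro j
      rw [getD_set_list]
      by_cases hjc : c = j ∧ c < R'.length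
      · rw [if_pos hjc]
        obtain ⟨hj, _⟩ := hjc
        simp only [List.mem_append, List.mem_singleton]
        rw [← hj, hmem' c]
        constructor
        · rintro (hh | hh)
          · exact hh
          · exact absurd hh hmn
        · intro hh; left; exact hh
      · rw [if_neg hjc]
        exact hmem' j

-- One step: A's body and B's body produce the same matrix, and the invariant
-- is preserved.
lemma step_eq (R : List (List Int)) (d : PySem.Dict Int Int) (n : Int) (h : InvFM R d) :
    ((findWhile n (R.length + 1) R 0).1.set (findWhile n (R.length + 1) R 0).2
      ((findWhile n (R.length + 1) R 0).1.getD (findWhile n (R.length + 1) R 0).2 [] ++ [n]))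
      = (altStep (R, d) n).1 ∧
    InvFM (altStep (R, d) n).1 (altStep (R, d) n).2 := by
  obtain ⟨hne, hinv⟩ := h
  obtain ⟨⟨hc0, hcle⟩, hmemn⟩ := hinv n
  obtain ⟨c, hcast⟩ : ∃ c : Nat, (c : Int) = d.getD n 0 := ⟨(d.getD n 0).toNat, by omega⟩
  have hRlen : 0 < R.length := List.length_pos_iff.mpr hne
  have hcleN : c ≤ R.length := by omega
  have hmemN : ∀ j : Nat, n ∈ R.getD j [] ↔ j < c := by
    intro j; rw [hmemn j, ← hcast]; omega
  have hlt0 : 0 < c ∨ c < R.length := by omega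
  have hwhile := findWhile_spec n c (R.length + 1) 0 R hmemN hcleN hlt0 (by omega) (by omega)
  have halt : altStep (R, d) n =
      ((if c = R.length then R ++ [[]] else R).set c
        ((if c = R.length then R ++ [[]] else R).getD c [] ++ [n]),
       d.insert n ((c : Int) + 1)) := by
    simp only [altStep, ← hcast, Int.toNat_natCast, Nat.cast_inj]
  -- facts about the post-append matrix R'
  have hcR' : c < (if c = R.length then R ++ [[]] else R).length := by
    by_cases hb : c = R.length
    · rw [if_pos hb]; simp; omega
    · rw [if_neg hb]; omega
  have hmemR'm : ∀ (m : Int) (j : Nat),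
      m ∈ (if c = R.length then R ++ [[]] else R).getD j [] ↔ m ∈ R.getD j [] := by
    intro m j
    by_cases hb : c = R.length
    · rw [if_pos hb, mem_getD_append_nil]
    · rw [if_neg hb]
  constructor
  · rw [hwhile, halt]
  · rw [halt]
    apply inv_update _ _ _ _ hcR' hcast
    · intro j; rw [hmemR'm]; exact hmemN j
    · intro m hmn
      obtain ⟨⟨h0, hle'⟩, hmem'⟩ := hinv m
      refine ⟨⟨h0, ?_⟩, ?_⟩
      · by_cases hb : c = R.length
        · rw [if_pos hb]; simp; omega
        · rw [if_neg hb]; omega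
      · intro j; rw [hmemR'm]; exact hmem' j

-- The two folds agree on the matrix component whenever the invariant holds.
lemma fold_eq : ∀ (nums : List Int) (R : List (List Int)) (d : PySem.Dict Int Int),
    InvFM R d →
    nums.foldl (fun twoD n =>
      let r := findWhile n (twoD.length + 1) twoD 0
      r.1.set r.2 (r.1.getD r.2 [] ++ [n])) R
    = (nums.foldl altStep (R, d)).1 := by
  intro nums
  induction nums with
  | nil => intro R d _; rfl
  | cons x xs ih =>
    intro R d h
    obtain ⟨heq, hinv⟩ := step_eq R d x h
    simp only [List.foldl_cons]
    rw [heq]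
    have hsplit : altStep (R, d) x = ((altStep (R, d) x).1, (altStep (R, d) x).2) := rfl
    rw [hsplit] at hinv ⊢
    exact ih _ _ hinv

lemma inv_init : InvFM [[]] PySem.Dict.empty := by
  constructor
  · simp
  · intro m
    refine ⟨⟨by simp, by simp⟩, ?_⟩
    intro i
    rw [PySem.Dict.getD_empty]
    constructor
    · intro h
      rcases i with _ | i
      · simp [List.getD] at h
      · simp [List.getD] at h
    · intro h; omega

-- ===== VERDICT (by name: the statement is the Claim_ definition above) =====
theorem findMatrix_spec : Claim_equal_findMatrix := by
  intro nums _
  show findMatrix nums = findMatrix_alt nums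
  unfold findMatrix findMatrix_alt
  exact fold_eq nums [[]] PySem.Dict.empty inv_init
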